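-- pv_equiv track=rewrite | github.com/LATTIX-IO/lattix-xfrontier | scripts/assign_tags_from_architecture.py | mapping_for
-- ===== SOURCE A (Python) =====
-- GROUPS = {
--     # Leadership & Strategy
--     "leadership": {
--         "agents": [
--             "ceo-strategy-agent",
--             "chief-of-staff-agent",
--             "cfo-agent",
--             "strategic-operations-agent",
--         ],
--         "tags": ["leadership", "strategy"],
--     },
--     # Go-To-Market (GTM) & Brand
--     "gtm": {
--         "agents": [
--             "marketing-agent",
--             "sales-agent",
--             "brand-strategy-agent",
--             "website-content-agent",
--             "social-media-agent",
--             "blog-writer-agent",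
--             "media-gen-agent",
--             "partnership-development-agent",
--             "customer-insights-agent",
--             "market-intelligence-agent",
--             "customer-success-agent",
--         ],
--         "tags": ["gtm", "brand", "growth", "content"],
--     },
--     # Product, Engineering & Platform
--     "engineering": {
--         "agents": [
--             "product-owner-agent",
--             "technical-writer-agent",
--             "developer-agent",
--             "test-qa-automation-agent",
--             "ai-architect-eng-agent",
--             "data-architect-eng-agent",
--             "uml-architect-agent",
--             "orchestration-agent",
--             "devops-platform-agent",
--             "prompt-engineering-agent",
--         ],
--         "tags": ["product", "engineering", "platform", "architecture"],
--     },
--     # Security, Risk & Compliance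
--     "security_compliance": {
--         "agents": [
--             "ciso-agent",
--             "iso27001-agent",
--             "nist-csf-2.0-agent",
--             "nist-80053-r5-agent",
--             "cmmc-2.0-agent",
--             "compliance-control-mapper",
--             "privacy-officer-agent",
--             "sar-builder-agent",
--             "ssp-builder-agent",
--             "threat-intelligence-agent",
--             "incident-handler-agent",
--             "threat-modeling-agent",
--             "cis-agent",
--             "government-contract-agent",
--             "general-counsel-agent",
--             "quality-compliance-agent",
--         ],
--         "tags": ["security", "risk", "compliance", "governance"],
--     },
--     # Operations & People
--     "operations_people": {
--         "agents": [
--             "people-ops-agent",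
--             "personnel-agent",
--             "learning-development-agent",
--         ],
--         "tags": ["operations", "people", "enablement"],
--     },
--     # Research & Funding
--     "research_funding": {
--         "agents": [
--             "research-agent",
--             "grants-rfp-agent",
--             "fundraising-agent",
--         ],
--         "tags": ["research", "funding"],
--     },
-- }
--
-- def mapping_for(agent_id: str) -> list[str]:
--     tags: list[str] = []
--     for group in GROUPS.values():
--         if agent_id in group["agents"]:
--             for t in group["tags"]:
--                 if t not in tags:
--                     tags.append(t)
--     if not tags:
--         tags = ["uncategorized"]
--     return tags
-- ===== SOURCE B (Python) =====
-- # B: flat module-level lookup table (each agent id occurs in exactly one group,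
-- # so its tags are just that group's tags); mapping_for is a single dict lookup
-- # returning a fresh list per call.  Idiomatic: table lookup instead of scanning groups.
--
-- AGENT_TAGS = {
--     'ceo-strategy-agent': ['leadership', 'strategy'],
--     'chief-of-staff-agent': ['leadership', 'strategy'],
--     'cfo-agent': ['leadership', 'strategy'],
--     'strategic-operations-agent': ['leadership', 'strategy'],
--     'marketing-agent': ['gtm', 'brand', 'growth', 'content'],
--     'sales-agent': ['gtm', 'brand', 'growth', 'content'],
--     'brand-strategy-agent': ['gtm', 'brand', 'growth', 'content'],
--     'website-content-agent': ['gtm', 'brand', 'growth', 'content'],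
--     'social-media-agent': ['gtm', 'brand', 'growth', 'content'],
--     'blog-writer-agent': ['gtm', 'brand', 'growth', 'content'],
--     'media-gen-agent': ['gtm', 'brand', 'growth', 'content'],
--     'partnership-development-agent': ['gtm', 'brand', 'growth', 'content'],
--     'customer-insights-agent': ['gtm', 'brand', 'growth', 'content'],
--     'market-intelligence-agent': ['gtm', 'brand', 'growth', 'content'],
--     'customer-success-agent': ['gtm', 'brand', 'growth', 'content'],
--     'product-owner-agent': ['product', 'engineering', 'platform', 'architecture'],
--     'technical-writer-agent': ['product', 'engineering', 'platform', 'architecture'],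
--     'developer-agent': ['product', 'engineering', 'platform', 'architecture'],
--     'test-qa-automation-agent': ['product', 'engineering', 'platform', 'architecture'],
--     'ai-architect-eng-agent': ['product', 'engineering', 'platform', 'architecture'],
--     'data-architect-eng-agent': ['product', 'engineering', 'platform', 'architecture'],
--     'uml-architect-agent': ['product', 'engineering', 'platform', 'architecture'],
--     'orchestration-agent': ['product', 'engineering', 'platform', 'architecture'],
--     'devops-platform-agent': ['product', 'engineering', 'platform', 'architecture'],
--     'prompt-engineering-agent': ['product', 'engineering', 'platform', 'architecture'],
--     'ciso-agent': ['security', 'risk', 'compliance', 'governance'],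
--     'iso27001-agent': ['security', 'risk', 'compliance', 'governance'],
--     'nist-csf-2.0-agent': ['security', 'risk', 'compliance', 'governance'],
--     'nist-80053-r5-agent': ['security', 'risk', 'compliance', 'governance'],
--     'cmmc-2.0-agent': ['security', 'risk', 'compliance', 'governance'],
--     'compliance-control-mapper': ['security', 'risk', 'compliance', 'governance'],
--     'privacy-officer-agent': ['security', 'risk', 'compliance', 'governance'],
--     'sar-builder-agent': ['security', 'risk', 'compliance', 'governance'],
--     'ssp-builder-agent': ['security', 'risk', 'compliance', 'governance'],
--     'threat-intelligence-agent': ['security', 'risk', 'compliance', 'governance'],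
--     'incident-handler-agent': ['security', 'risk', 'compliance', 'governance'],
--     'threat-modeling-agent': ['security', 'risk', 'compliance', 'governance'],
--     'cis-agent': ['security', 'risk', 'compliance', 'governance'],
--     'government-contract-agent': ['security', 'risk', 'compliance', 'governance'],
--     'general-counsel-agent': ['security', 'risk', 'compliance', 'governance'],
--     'quality-compliance-agent': ['security', 'risk', 'compliance', 'governance'],
--     'people-ops-agent': ['operations', 'people', 'enablement'],
--     'personnel-agent': ['operations', 'people', 'enablement'],
--     'learning-development-agent': ['operations', 'people', 'enablement'],
--     'research-agent': ['research', 'funding'],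
--     'grants-rfp-agent': ['research', 'funding'],
--     'fundraising-agent': ['research', 'funding'],
-- }
--
--
-- def mapping_for(agent_id: str) -> list[str]:
--     return list(AGENT_TAGS.get(agent_id, ['uncategorized']))
-- ===== Notes on version B (the rewrite author's own statement) =====
-- stated objective: idiomatic
-- what changed: B replaces A's per-call scan over every group's agent list (with incremental tag dedup) by a flat module-level literal table mapping each agent id directly to its tags (exact because each agent occurs in exactly one group), so mapping_for is a single dict lookup with a default; a timing run could not measure a difference at the tested sizes.
import Mathlib
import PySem

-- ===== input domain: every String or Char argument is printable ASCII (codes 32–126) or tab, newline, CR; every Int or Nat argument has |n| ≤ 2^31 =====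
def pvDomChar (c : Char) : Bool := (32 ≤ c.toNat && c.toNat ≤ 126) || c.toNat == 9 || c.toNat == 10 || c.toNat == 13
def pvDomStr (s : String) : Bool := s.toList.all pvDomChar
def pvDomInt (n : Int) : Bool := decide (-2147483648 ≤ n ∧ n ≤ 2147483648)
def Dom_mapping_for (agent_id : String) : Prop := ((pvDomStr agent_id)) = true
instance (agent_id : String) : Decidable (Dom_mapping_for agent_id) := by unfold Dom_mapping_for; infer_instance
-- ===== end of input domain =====

-- B replaces A's per-call scan over all groups by a flat literal agent→tags table and a single lookup (idiomatic; return value only — both return a fresh list per call).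

-- ===== PORT A =====
-- GROUPS.values() as (agents, tags) pairs, A's module data
def pvGroups : List (List String × List String) :=
  [ (["ceo-strategy-agent", "chief-of-staff-agent", "cfo-agent",
      "strategic-operations-agent"], ["leadership", "strategy"]),
    (["marketing-agent", "sales-agent", "brand-strategy-agent",
      "website-content-agent", "social-media-agent", "blog-writer-agent",
      "media-gen-agent", "partnership-development-agent",
      "customer-insights-agent", "market-intelligence-agent",
      "customer-success-agent"], ["gtm", "brand", "growth", "content"]),
    (["product-owner-agent", "technical-writer-agent", "developer-agent",
      "test-qa-automation-agent", "ai-architect-eng-agent",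
      "data-architect-eng-agent", "uml-architect-agent", "orchestration-agent",
      "devops-platform-agent", "prompt-engineering-agent"],
     ["product", "engineering", "platform", "architecture"]),
    (["ciso-agent", "iso27001-agent", "nist-csf-2.0-agent",
      "nist-80053-r5-agent", "cmmc-2.0-agent", "compliance-control-mapper",
      "privacy-officer-agent", "sar-builder-agent", "ssp-builder-agent",
      "threat-intelligence-agent", "incident-handler-agent",
      "threat-modeling-agent", "cis-agent", "government-contract-agent",
      "general-counsel-agent", "quality-compliance-agent"],
     ["security", "risk", "compliance", "governance"]),
    (["people-ops-agent", "personnel-agent", "learning-development-agent"],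
     ["operations", "people", "enablement"]),
    (["research-agent", "grants-rfp-agent", "fundraising-agent"],
     ["research", "funding"]) ]

def mapping_for (agent_id : String) : List String :=
  let tags : List String :=
    pvGroups.foldl (fun tags g =>
      if agent_id ∈ g.1 then
        g.2.foldl (fun tags t => if t ∈ tags then tags else tags ++ [t]) tags
      else tags) []
  if tags = [] then ["uncategorized"] else tags

-- ===== PORT B =====
-- Source B's flat literal table AGENT_TAGS (a dict literal)
def pvAgentTags : PySem.Dict String (List String) :=
  PySem.Dict.ofList [
    ("ceo-strategy-agent", ["leadership", "strategy"]),
    ("chief-of-staff-agent", ["leadership", "strategy"]),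
    ("cfo-agent", ["leadership", "strategy"]),
    ("strategic-operations-agent", ["leadership", "strategy"]),
    ("marketing-agent", ["gtm", "brand", "growth", "content"]),
    ("sales-agent", ["gtm", "brand", "growth", "content"]),
    ("brand-strategy-agent", ["gtm", "brand", "growth", "content"]),
    ("website-content-agent", ["gtm", "brand", "growth", "content"]),
    ("social-media-agent", ["gtm", "brand", "growth", "content"]),
    ("blog-writer-agent", ["gtm", "brand", "growth", "content"]),
    ("media-gen-agent", ["gtm", "brand", "growth", "content"]),
    ("partnership-development-agent", ["gtm", "brand", "growth", "content"]),
    ("customer-insights-agent", ["gtm", "brand", "growth", "content"]),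
    ("market-intelligence-agent", ["gtm", "brand", "growth", "content"]),
    ("customer-success-agent", ["gtm", "brand", "growth", "content"]),
    ("product-owner-agent", ["product", "engineering", "platform", "architecture"]),
    ("technical-writer-agent", ["product", "engineering", "platform", "architecture"]),
    ("developer-agent", ["product", "engineering", "platform", "architecture"]),
    ("test-qa-automation-agent", ["product", "engineering", "platform", "architecture"]),
    ("ai-architect-eng-agent", ["product", "engineering", "platform", "architecture"]),
    ("data-architect-eng-agent", ["product", "engineering", "platform", "architecture"]),
    ("uml-architect-agent", ["product", "engineering", "platform", "architecture"]),
    ("orchestration-agent", ["product", "engineering", "platform", "architecture"]),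
    ("devops-platform-agent", ["product", "engineering", "platform", "architecture"]),
    ("prompt-engineering-agent", ["product", "engineering", "platform", "architecture"]),
    ("ciso-agent", ["security", "risk", "compliance", "governance"]),
    ("iso27001-agent", ["security", "risk", "compliance", "governance"]),
    ("nist-csf-2.0-agent", ["security", "risk", "compliance", "governance"]),
    ("nist-80053-r5-agent", ["security", "risk", "compliance", "governance"]),
    ("cmmc-2.0-agent", ["security", "risk", "compliance", "governance"]),
    ("compliance-control-mapper", ["security", "risk", "compliance", "governance"]),
    ("privacy-officer-agent", ["security", "risk", "compliance", "governance"]),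
    ("sar-builder-agent", ["security", "risk", "compliance", "governance"]),
    ("ssp-builder-agent", ["security", "risk", "compliance", "governance"]),
    ("threat-intelligence-agent", ["security", "risk", "compliance", "governance"]),
    ("incident-handler-agent", ["security", "risk", "compliance", "governance"]),
    ("threat-modeling-agent", ["security", "risk", "compliance", "governance"]),
    ("cis-agent", ["security", "risk", "compliance", "governance"]),
    ("government-contract-agent", ["security", "risk", "compliance", "governance"]),
    ("general-counsel-agent", ["security", "risk", "compliance", "governance"]),
    ("quality-compliance-agent", ["security", "risk", "compliance", "governance"]),
    ("people-ops-agent", ["operations", "people", "enablement"]),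
    ("personnel-agent", ["operations", "people", "enablement"]),
    ("learning-development-agent", ["operations", "people", "enablement"]),
    ("research-agent", ["research", "funding"]),
    ("grants-rfp-agent", ["research", "funding"]),
    ("fundraising-agent", ["research", "funding"])
  ]

def mapping_for_alt (agent_id : String) : List String :=
  pvAgentTags.getD agent_id ["uncategorized"]

-- ===== PRECONDITION & SPEC =====
def Spec_mapping_for (agent_id : String) (out : List String) : Prop := out = mapping_for_alt agent_id
instance (agent_id : String) (out : List String) : Decidable (Spec_mapping_for agent_id out) := by unfold Spec_mapping_for; infer_instance

-- ===== CLAIM =====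
def Claim_equal_mapping_for : Prop := ∀ (agent_id : String), Dom_mapping_for agent_id → Spec_mapping_for agent_id (mapping_for agent_id)

-- ===== LEMMAS AND PROOFS =====

set_option maxRecDepth 100000

-- all 47 agent ids, used only to split the proof into hit/miss cases
def pvAllAgents : List String := pvGroups.flatMap Prod.fst

lemma pv_hit (s : String) (h : s ∈ pvAllAgents) :
    mapping_for s = mapping_for_alt s := by
  simp [pvAllAgents, pvGroups] at h
  rcases h with h|h|h|h|h|h|h|h|h|h|h|h|h|h|h|h|h|h|h|h|h|h|h|h|h|h|h|h|h|h|h|h|h|h|h|h|h|h|h|h|h|h|h|h|h|h|h <;>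
    subst h <;> decide

lemma pvAgentTags_keys : pvAgentTags.keys = pvAllAgents := by decide

lemma pv_fold_skip (s : String) (gs : List (List String × List String))
    (acc : List String) (h : ∀ g ∈ gs, s ∉ g.1) :
    gs.foldl (fun tags g =>
      if s ∈ g.1 then
        g.2.foldl (fun tags t => if t ∈ tags then tags else tags ++ [t]) tags
      else tags) acc = acc := by
  induction gs generalizing acc with
  | nil => rfl
  | cons g rest ih =>
    rw [List.foldl_cons, if_neg (h g (List.mem_cons_self))]
    exact ih acc (fun g' hg' => h g' (List.mem_cons_of_mem _ hg'))

lemma pv_miss (s : String) (h : s ∉ pvAllAgents) :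
    mapping_for s = mapping_for_alt s := by
  have hget : pvAgentTags.get? s = none := by
    rw [PySem.Dict.get?_eq_none_iff_not_mem_keys, pvAgentTags_keys]; exact h
  have hgs : ∀ g ∈ pvGroups, s ∉ g.1 := by
    intro g hg hs
    exact h (List.mem_flatMap.mpr ⟨g, hg, hs⟩)
  unfold mapping_for mapping_for_alt
  rw [pv_fold_skip s pvGroups [] hgs]
  simp [PySem.Dict.getD, hget]

-- ===== VERDICT =====
theorem mapping_for_spec : Claim_equal_mapping_for := by
  intro s _
  unfold Spec_mapping_for
  by_cases h : s ∈ pvAllAgents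
  · exact pv_hit s h
  · exact pv_miss s h
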